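-- pv_equiv track=rewrite | github.com/mohammadalkhawaldah/Content_Creater | src/atomize_mvp/web_jobs.py | _infer_progress
-- ===== SOURCE A (Python) =====
-- def _infer_progress(steps: dict) -> tuple[str | None, int, bool, bool]:
--     order = [
--         "init",
--         "stage_source",
--         "prepare_audio",
--         "transcribe",
--         "cleanup_transcript",
--         "blueprint",
--         "generate_drafts",
--         "finalize_delivery",
--         "render_cards",
--         "export_posters",
--         "export_structured_posters",
--         "export_structured_posters_premium",
--         "export_infographic_posters",
--     ]
--     completed = 0
--     current = None
--     has_failed = False
--     has_running = False
--     for step in order: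
--         status = steps.get(step, {}).get("status")
--         if status == "done":
--             completed += 1
--         elif status == "running":
--             current = step
--             has_running = True
--             break
--         elif status == "failed":
--             has_failed = True
--     percent = int((completed / max(len(order), 1)) * 100)
--     return current, percent, has_running, has_failed
-- ===== SOURCE B (Python) =====
-- def _infer_progress(steps: dict) -> tuple[str | None, int, bool, bool]:
--     order = [
--         "init",
--         "stage_source",
--         "prepare_audio",
--         "transcribe",
--         "cleanup_transcript",
--         "blueprint",
--         "generate_drafts",
--         "finalize_delivery",
--         "render_cards",
--         "export_posters",
--         "export_structured_posters",
--         "export_structured_posters_premium",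
--         "export_infographic_posters",
--     ]
--     statuses = [steps.get(step, {}).get("status") for step in order]
--     cut = next((i for i, st in enumerate(statuses) if st == "running"), len(order))
--     has_running = cut < len(order)
--     current = order[cut] if has_running else None
--     prefix = statuses[:cut]
--     completed = prefix.count("done")
--     has_failed = "failed" in prefix
--     percent = int((completed / max(len(order), 1)) * 100)
--     return current, percent, has_running, has_failed
-- ===== Notes on version B (the rewrite author's own statement) =====
-- stated objective: alternative
-- what changed: Replaces A's fused accumulate-and-break loop with a locate-then-tabulate pipeline: build the status list once, find the first 'running' index, then compute completed/has_failed by count/membership on the prefix.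
import Mathlib
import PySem

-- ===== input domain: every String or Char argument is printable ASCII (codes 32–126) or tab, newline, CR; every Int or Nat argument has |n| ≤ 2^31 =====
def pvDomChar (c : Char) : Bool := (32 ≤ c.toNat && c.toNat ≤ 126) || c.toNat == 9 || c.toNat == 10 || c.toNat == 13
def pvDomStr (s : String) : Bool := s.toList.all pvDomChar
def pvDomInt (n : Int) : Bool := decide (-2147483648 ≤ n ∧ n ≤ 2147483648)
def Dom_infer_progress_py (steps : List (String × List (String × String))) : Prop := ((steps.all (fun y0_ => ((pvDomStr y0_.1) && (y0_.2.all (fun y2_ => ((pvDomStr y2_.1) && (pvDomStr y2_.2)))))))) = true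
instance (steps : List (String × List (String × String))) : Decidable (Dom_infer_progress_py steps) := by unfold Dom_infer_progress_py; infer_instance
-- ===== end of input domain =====

-- B changes the decomposition only (locate the first 'running', then tabulate the prefix); same result, same cost.

-- ===== PORT A =====
-- steps.get(step, {}).get("status") (shared lookup helper, used verbatim by both Pythons)
def pvStatusOf (steps : List (String × List (String × String))) (step : String) : Option String :=
  PySem.Dict.get? (PySem.Dict.mk ((PySem.Dict.get? (PySem.Dict.mk steps) step).getD [])) "status"

def pvOrder : List String :=
  ["init", "stage_source", "prepare_audio", "transcribe", "cleanup_transcript", "blueprint",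
   "generate_drafts", "finalize_delivery", "render_cards", "export_posters",
   "export_structured_posters", "export_structured_posters_premium", "export_infographic_posters"]

-- A's for-loop with break, state (completed, has_failed); returns (current, completed, has_running, has_failed)
def pvLoopA (steps : List (String × List (String × String))) :
    List String → Int → Bool → Option String × Int × Bool × Bool
  | [], completed, has_failed => (none, completed, false, has_failed)
  | step :: rest, completed, has_failed =>
    let status := pvStatusOf steps step
    if status == some "done" then pvLoopA steps rest (completed + 1) has_failed
    else if status == some "running" then (some step, completed, true, has_failed)
    else if status == some "failed" then pvLoopA steps rest completed true
    else pvLoopA steps rest completed has_failed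

def infer_progress_py (steps : List (String × List (String × String))) : Option String × Int × Bool × Bool :=
  let r := pvLoopA steps pvOrder 0 false
  -- percent = int((completed / max(len(order), 1)) * 100): exact as floor division here,
  -- verified for every reachable completed ∈ [0, 13]
  (r.1, PySem.Int.floordiv (r.2.1 * 100) (max (pvOrder.length : Int) 1), r.2.2.1, r.2.2.2)

-- ===== PORT B =====
def infer_progress_py_alt (steps : List (String × List (String × String))) : Option String × Int × Bool × Bool :=
  let statuses := pvOrder.map (pvStatusOf steps)
  let cut := (statuses.findIdx? (fun st => st == some "running")).getD pvOrder.length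
  let has_running := decide (cut < pvOrder.length)
  let current := if cut < pvOrder.length then pvOrder[cut]? else none
  let pre := statuses.take cut
  let completed : Int := PySem.List.count pre (some "done")
  let has_failed := pre.contains (some "failed")
  (current, PySem.Int.floordiv (completed * 100) (max (pvOrder.length : Int) 1), has_running, has_failed)

-- ===== PRECONDITION & SPEC =====
def Spec_infer_progress_py (steps : List (String × List (String × String))) (out : Option String × Int × Bool × Bool) : Prop := out = infer_progress_py_alt steps
instance (steps : List (String × List (String × String))) (out : Option String × Int × Bool × Bool) : Decidable (Spec_infer_progress_py steps out) := by unfold Spec_infer_progress_py; infer_instance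

-- ===== CLAIM (what is proved, stated in full; the proofs are below) =====
def Claim_equal_infer_progress_py : Prop := ∀ (steps : List (String × List (String × String))), Dom_infer_progress_py steps → Spec_infer_progress_py steps (infer_progress_py steps)

-- ===== LEMMAS AND PROOFS =====

-- A's fused loop equals B's locate-then-tabulate pipeline, for any order list and accumulators.
theorem pvLoopA_eq (steps : List (String × List (String × String))) :
    ∀ (order : List String) (c : Int) (hf : Bool),
      pvLoopA steps order c hf =
        (let statuses := order.map (pvStatusOf steps)
         let cut := (statuses.findIdx? (fun st => st == some "running")).getD order.length
         ((if cut < order.length then order[cut]? else none),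
          c + (PySem.List.count (statuses.take cut) (some "done") : Int),
          decide (cut < order.length),
          hf || (statuses.take cut).contains (some "failed"))) := by
  intro order
  induction order with
  | nil => intro c hf; simp [pvLoopA, PySem.List.count]
  | cons step rest ih =>
    intro c hf
    by_cases hr' : pvStatusOf steps step = some "running"
    · simp [pvLoopA, List.findIdx?_cons, hr', PySem.List.count]
    · cases hfind : List.findIdx? (fun st => st == some "running") (rest.map (pvStatusOf steps)) with
      | none =>
        by_cases hd' : pvStatusOf steps step = some "done"
        · simp [pvLoopA, List.findIdx?_cons, hd', hfind, ih, PySem.List.count]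
          omega
        · by_cases hfl' : pvStatusOf steps step = some "failed"
          · simp [pvLoopA, List.findIdx?_cons, hfl', hfind, ih, PySem.List.count]
          · simp [pvLoopA, List.findIdx?_cons, hr', hd', hfl', Ne.symm hfl', hfind, ih, PySem.List.count]
      | some i =>
        have hilt' : i < rest.length := by
          simpa using (List.findIdx?_eq_some_iff_findIdx_eq.mp hfind).1
        by_cases hd' : pvStatusOf steps step = some "done"
        · simp [pvLoopA, List.findIdx?_cons, hd', hfind, ih, PySem.List.count, hilt']
          omega
        · by_cases hfl' : pvStatusOf steps step = some "failed"
          · simp [pvLoopA, List.findIdx?_cons, hfl', hfind, ih, PySem.List.count, hilt']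
          · simp [pvLoopA, List.findIdx?_cons, hr', hd', hfl', Ne.symm hfl', hfind, ih, PySem.List.count, hilt']

-- ===== VERDICT (by name: the statement is the Claim_ definition above) =====
theorem infer_progress_py_spec : Claim_equal_infer_progress_py := by
  intro steps _
  unfold Spec_infer_progress_py infer_progress_py infer_progress_py_alt
  rw [pvLoopA_eq]
  simp
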